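-- pv_equiv track=rewrite | github.com/YSZhuoyang/Data-structures-and-algorithms | Py_solution/whackAMole.py | whackAMole2
-- ===== SOURCE A (Python) =====
-- def whackAMole(moles, mallet):
--     w = mallet
--     n = len(moles)
--     if n <= w:
--         return sum(moles)
--
--     # Init a sliding window
--     total = sum(moles[:w])
--     maxHit = total
--     # Move the window to the right
--     for i in range(w, n):
--         total = total + moles[i] - moles[i - w]
--         maxHit = max(maxHit, total)
--
--     return maxHit
--
-- def whackAMole2(moles, mallet):
--     w = mallet
--     n = len(moles)
--     maxH = 0
--     for i in range(w, n - w + 1):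
--         left = whackAMole(moles[:i], mallet)
--         right = whackAMole(moles[i:], mallet)
--         maxH = max(maxH, left + right)
--
--     return maxH
-- ===== SOURCE B (Python) =====
-- def windowSums(moles, w):
--     # sums of all windows of size w, by one sliding pass
--     total = sum(moles[:w])
--     out = [total]
--     for j in range(w, len(moles)):
--         total += moles[j] - moles[j - w]
--         out.append(total)
--     return out
--
-- def runningMax(xs):
--     out = []
--     cur = xs[0]
--     for x in xs:
--         cur = max(cur, x)
--         out.append(cur)
--     return out
--
-- def whackAMole2(moles, mallet):
--     w = mallet
--     n = len(moles)
--     if w < 0 or n < 2 * w: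
--         return 0
--     wsum = windowSums(moles, w)
--     pref = runningMax(wsum)                 # pref[k] = best window inside moles[:k+w]
--     suff = runningMax(wsum[::-1])[::-1]     # suff[k] = best window inside moles[k:]
--     best = 0
--     for i in range(w, n - w + 1):
--         best = max(best, pref[i - w] + suff[i])
--     return best
-- ===== Notes on version B (the rewrite author's own statement) =====
-- stated objective: alternative
-- what changed: Replaces the outer loop that recomputes the best size-w window of every prefix and suffix from scratch (O(n^2)) with one sliding-window pass producing all window sums plus prefix/suffix running-maximum arrays combined per split point (O(n)).
import Mathlib
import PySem

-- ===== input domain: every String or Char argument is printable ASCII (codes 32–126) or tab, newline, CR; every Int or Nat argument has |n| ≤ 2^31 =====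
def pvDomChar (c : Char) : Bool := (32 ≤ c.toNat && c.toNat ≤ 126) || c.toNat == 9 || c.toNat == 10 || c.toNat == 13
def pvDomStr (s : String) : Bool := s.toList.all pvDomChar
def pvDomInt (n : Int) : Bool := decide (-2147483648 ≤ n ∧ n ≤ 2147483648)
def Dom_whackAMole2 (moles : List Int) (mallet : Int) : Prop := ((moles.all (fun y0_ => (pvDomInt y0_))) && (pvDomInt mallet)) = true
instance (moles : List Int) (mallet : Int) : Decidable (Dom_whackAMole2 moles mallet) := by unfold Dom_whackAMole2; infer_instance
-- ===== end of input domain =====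

-- B replaces A's per-split prefix/suffix rescans by one sliding-window pass plus precomputed
-- running-maximum arrays (objective: alternative algorithm).


-- ===== PORT A =====
def whackAMole (moles : List Int) (mallet : Int) : Int :=
  let w := mallet
  let n : Int := moles.length
  if n ≤ w then moles.sum
  else
    let total := (PySem.List.slice moles none (some w)).sum
    let r := (PySem.List.pyRange w n 1).foldl
      (fun (st : Int × Int) i =>
        let t := st.1 + PySem.List.pyGetD moles i 0 - PySem.List.pyGetD moles (i - w) 0
        (t, max st.2 t)) (total, total)
    r.2

def whackAMole2 (moles : List Int) (mallet : Int) : Int :=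
  let w := mallet
  let n : Int := moles.length
  (PySem.List.pyRange w (n - w + 1) 1).foldl
    (fun maxH i =>
      let left := whackAMole (PySem.List.slice moles none (some i)) mallet
      let right := whackAMole (PySem.List.slice moles (some i) none) mallet
      max maxH (left + right)) 0

-- ===== PORT B =====
def pvWindowSums (moles : List Int) (w : Int) : List Int :=
  let total := (PySem.List.slice moles none (some w)).sum
  ((PySem.List.pyRange w (moles.length : Int) 1).foldl
    (fun (st : Int × List Int) j =>
      let t := st.1 + PySem.List.pyGetD moles j 0 - PySem.List.pyGetD moles (j - w) 0
      (t, st.2 ++ [t])) (total, [total])).2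

-- out = []; cur = xs[0]; for x in xs: cur = max(cur, x); out.append(cur)
def pvRunningMax (xs : List Int) : List Int :=
  (xs.foldl (fun (st : Int × List Int) x =>
      let c := max st.1 x
      (c, st.2 ++ [c])) (PySem.List.pyGetD xs 0 0, [])).2

def whackAMole2_alt (moles : List Int) (mallet : Int) : Int :=
  let w := mallet
  let n : Int := moles.length
  if w < 0 ∨ n < 2 * w then 0
  else
    let wsum := pvWindowSums moles w
    let pref := pvRunningMax wsum
    -- wsum[::-1] is reverse (PySem.List.slice?_none_none_neg_one)
    let suff := (pvRunningMax wsum.reverse).reverse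
    (PySem.List.pyRange w (n - w + 1) 1).foldl
      (fun best i =>
        max best (PySem.List.pyGetD pref (i - w) 0 + PySem.List.pyGetD suff i 0)) 0

-- ===== PRECONDITION & SPEC =====
-- A raises IndexError for every mallet < 0 (the sliding loop reads moles[i - w] past the end);
-- Pre_ excludes exactly those inputs, on which A never returns (B returns 0 there).
def Pre_whackAMole2 (moles : List Int) (mallet : Int) : Prop := 0 ≤ mallet
instance (moles : List Int) (mallet : Int) : Decidable (Pre_whackAMole2 moles mallet) := by unfold Pre_whackAMole2; infer_instance
def pvWitness_whackAMole2 : List Int × Int := ([1, -2, 3, 4, -1, 2], 2)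

def Spec_whackAMole2 (moles : List Int) (mallet : Int) (out : Int) : Prop := out = whackAMole2_alt moles mallet
instance (moles : List Int) (mallet : Int) (out : Int) : Decidable (Spec_whackAMole2 moles mallet out) := by unfold Spec_whackAMole2; infer_instance

-- ===== CLAIM (what is proved, stated in full; the proofs are below) =====
def Claim_equal_whackAMole2 : Prop := ∀ (moles : List Int) (mallet : Int), Dom_whackAMole2 moles mallet → Pre_whackAMole2 moles mallet → Spec_whackAMole2 moles mallet (whackAMole2 moles mallet)

-- ===== LEMMAS AND PROOFS =====

def pvWin (xs : List Int) (W j : Nat) : Int := ((xs.drop j).take W).sum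

def pvWS (xs : List Int) (W : Nat) : List Int := (List.range (xs.length - W + 1)).map (pvWin xs W)

def pvMaxOf (l : List Int) : Int := l.foldl max (l.headD 0)

def pvTotals (xs : List Int) (w : Int) : Int → List Int → List Int
  | _, [] => []
  | t, i :: is =>
    let t' := t + PySem.List.pyGetD xs i 0 - PySem.List.pyGetD xs (i - w) 0
    t' :: pvTotals xs w t' is

def pvRmx : Int → List Int → List Int
  | _, [] => []
  | c, x :: xs => let c' := max c x; c' :: pvRmx c' xs

theorem pvFoldA (xs : List Int) (w : Int) (idx : List Int) : ∀ (t m : Int),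
    (idx.foldl (fun (st : Int × Int) i =>
      let t' := st.1 + PySem.List.pyGetD xs i 0 - PySem.List.pyGetD xs (i - w) 0
      (t', max st.2 t')) (t, m)).2 = (pvTotals xs w t idx).foldl max m := by
  induction idx with
  | nil => intro t m; simp [pvTotals]
  | cons i is ih => intro t m; simp only [List.foldl_cons, pvTotals]; exact ih _ _

theorem pvFoldL (xs : List Int) (w : Int) (idx : List Int) : ∀ (t : Int) (l : List Int),
    (idx.foldl (fun (st : Int × List Int) i =>
      let t' := st.1 + PySem.List.pyGetD xs i 0 - PySem.List.pyGetD xs (i - w) 0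
      (t', st.2 ++ [t'])) (t, l)).2 = l ++ pvTotals xs w t idx := by
  induction idx with
  | nil => intro t l; simp [pvTotals]
  | cons i is ih => intro t l; simp only [List.foldl_cons, pvTotals]; rw [ih]; simp

theorem pvFoldR (xs : List Int) : ∀ (c : Int) (l : List Int),
    (xs.foldl (fun (st : Int × List Int) x =>
      let c' := max st.1 x
      (c', st.2 ++ [c'])) (c, l)).2 = l ++ pvRmx c xs := by
  induction xs with
  | nil => intro c l; simp [pvRmx]
  | cons x t ih => intro c l; simp only [List.foldl_cons, pvRmx]; rw [ih]; simp

theorem pvStep (xs : List Int) (W j : Nat) (hj : j + W < xs.length) :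
    pvWin xs W j + PySem.List.pyGetD xs ((j : Int) + W) 0
      - PySem.List.pyGetD xs (((j : Int) + W) - W) 0 = pvWin xs W (j + 1) := by
  have h1 : ((j : Int) + W) = ((j + W : Nat) : Int) := by push_cast; ring
  have h2 : (((j + W : Nat) : Int) - W) = ((j : Nat) : Int) := by push_cast; ring
  rw [h1, h2, PySem.List.pyGetD_natCast, PySem.List.pyGetD_natCast]
  rw [List.getD_eq_getElem _ _ (by omega), List.getD_eq_getElem _ _ (by omega)]
  cases W with
  | zero => simp [pvWin]
  | succ V =>
    unfold pvWin
    have hd : xs.drop j = xs[j] :: xs.drop (j + 1) := (List.getElem_cons_drop (by omega)).symm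
    rw [hd]
    rw [List.take_succ_cons, List.take_add_one]
    have hg : (xs.drop (j+1))[V]? = some (xs[j + 1 + V]'(by omega)) := by
      rw [List.getElem?_drop, List.getElem?_eq_getElem (by omega)]
    rw [hg]
    have he : xs[j + (V + 1)]'(by omega) = xs[j + 1 + V]'(by omega) := by
      congr 1; omega
    simp [List.sum_cons, he]
    ring

theorem pvChain (xs : List Int) (W : Nat) : ∀ (k j : Nat), j + W + k = xs.length →
    pvTotals xs W (pvWin xs W j) (PySem.List.pyRange ((j : Int) + W) xs.length 1)
      = (List.range k).map (fun d => pvWin xs W (j + 1 + d)) := by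
  intro k
  induction k with
  | zero =>
    intro j hj
    rw [PySem.List.pyRange_one_eq_nil (by omega)]
    simp [pvTotals]
  | succ k ih =>
    intro j hj
    rw [PySem.List.pyRange_one_cons (by omega)]
    simp only [pvTotals]
    rw [pvStep xs W j (by omega)]
    have hr : ((j : Int) + W) + 1 = (((j + 1 : Nat) : Int) + W) := by push_cast; ring
    rw [hr, ih (j + 1) (by omega)]
    rw [List.range_succ_eq_map]
    simp only [List.map_cons, List.map_map]
    have hf : (fun d => pvWin xs W (j + 1 + 1 + d)) = (fun d => pvWin xs W (j + 1 + d)) ∘ Nat.succ := by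
      funext d
      simp only [Function.comp_apply]
      congr 1
      omega
    rw [hf]

theorem pvWS_eq (xs : List Int) (W : Nat) (h : W ≤ xs.length) :
    pvWS xs W = pvWin xs W 0 :: pvTotals xs W (pvWin xs W 0) (PySem.List.pyRange (W : Int) xs.length 1) := by
  have hc := pvChain xs W (xs.length - W) 0 (by omega)
  simp only [Nat.cast_zero, zero_add] at hc
  rw [hc]
  unfold pvWS
  have hn : xs.length - W + 1 = (xs.length - W) + 1 := rfl
  rw [hn, List.range_succ_eq_map, List.map_cons, List.map_map]
  refine congrArg₂ _ rfl ?_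
  exact List.map_congr_left (fun d _ => by
    simp only [Function.comp_apply]
    congr 1
    omega)

theorem pvTotal0 (xs : List Int) (W : Nat) :
    (PySem.List.slice xs none (some (W : Int))).sum = pvWin xs W 0 := by
  rw [PySem.List.slice_to_natCast]
  simp [pvWin]

theorem pvWindowSums_eq (xs : List Int) (W : Nat) :
    pvWindowSums xs (W : Int) = pvWS xs W := by
  unfold pvWindowSums
  simp only
  rw [pvFoldL, pvTotal0]
  by_cases h : W ≤ xs.length
  · rw [pvWS_eq xs W h]
    rfl
  · rw [PySem.List.pyRange_one_eq_nil (by omega)]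
    unfold pvWS pvTotals
    have : xs.length - W + 1 = 1 := by omega
    rw [this]
    simp

theorem pvMaxOf_cons (a : Int) (l : List Int) : pvMaxOf (a :: l) = l.foldl max a := by
  simp [pvMaxOf]

theorem pvWhackAMole_eq (xs : List Int) (W : Nat) :
    whackAMole xs (W : Int) = pvMaxOf (pvWS xs W) := by
  unfold whackAMole
  simp only
  by_cases h : (xs.length : Int) ≤ (W : Int)
  · rw [if_pos h]
    unfold pvWS
    have h1 : xs.length - W + 1 = 1 := by omega
    rw [h1]
    have h2 : pvWin xs W 0 = xs.sum := by
      unfold pvWin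
      rw [List.drop_zero, List.take_of_length_le (by omega)]
    simp [pvMaxOf, h2]
  · rw [if_neg h]
    rw [pvFoldA, pvTotal0]
    rw [pvWS_eq xs W (by omega), pvMaxOf_cons]

theorem pvMaxOf_spec (l : List Int) (h : l ≠ []) : pvMaxOf l ∈ l ∧ ∀ x ∈ l, x ≤ pvMaxOf l := by
  cases l with
  | nil => simp at h
  | cons a t =>
    rw [pvMaxOf_cons]
    refine ⟨?_, ?_⟩
    · rcases PySem.List.foldl_max_mem t a with h1 | h1
      · rw [h1]; exact List.mem_cons_self
      · exact List.mem_cons_of_mem _ h1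
    · intro x hx
      rcases List.mem_cons.mp hx with rfl | hx
      · exact (PySem.List.le_foldl_max t x).1
      · exact (PySem.List.le_foldl_max t a).2 x hx

theorem pvMaxOf_reverse (l : List Int) (h : l ≠ []) : pvMaxOf l.reverse = pvMaxOf l := by
  have hr : l.reverse ≠ [] := by simpa using h
  obtain ⟨m1, hm1⟩ := pvMaxOf_spec l.reverse hr
  obtain ⟨m2, hm2⟩ := pvMaxOf_spec l h
  exact le_antisymm (hm2 _ (List.mem_reverse.mp m1)) (hm1 _ (List.mem_reverse.mpr m2))

theorem pvMaxOf_foldl_self (l : List Int) : l.foldl max (l.getD 0 0) = pvMaxOf l := by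
  cases l with
  | nil => simp [pvMaxOf]
  | cons a t => simp [pvMaxOf_cons]

theorem pvRmx_get (xs : List Int) : ∀ (c : Int) (k : Nat), k < xs.length →
    (pvRmx c xs)[k]? = some ((xs.take (k + 1)).foldl max c) := by
  induction xs with
  | nil => intro c k hk; simp at hk
  | cons x t ih =>
    intro c k hk
    cases k with
    | zero => simp [pvRmx]
    | succ k =>
      simp only [pvRmx, List.getElem?_cons_succ, List.take_succ_cons, List.foldl_cons]
      exact ih (max c x) k (by simpa using hk)

theorem pvRmx_length (xs : List Int) : ∀ c, (pvRmx c xs).length = xs.length := by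
  induction xs with
  | nil => intro c; simp [pvRmx]
  | cons x t ih => intro c; simp [pvRmx, ih]

theorem pvRunningMax_eq (xs : List Int) : pvRunningMax xs = pvRmx (xs.getD 0 0) xs := by
  unfold pvRunningMax
  rw [pvFoldR]
  simp [PySem.List.pyGetD_zero]

theorem pvPrefGet (l : List Int) (k : Nat) (hk : k < l.length) :
    PySem.List.pyGetD (pvRmx (l.getD 0 0) l) (k : Int) 0 = pvMaxOf (l.take (k + 1)) := by
  rw [PySem.List.pyGetD_natCast, List.getD_eq_getElem?_getD, pvRmx_get l _ k hk]
  cases l with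
  | nil => simp at hk
  | cons a t =>
    simp only [List.getD_cons_zero, List.take_succ_cons, List.foldl_cons, pvMaxOf_cons,
      Option.getD_some, max_self]

theorem pvSuffGet (l : List Int) (I : Nat) (hI : I < l.length) :
    PySem.List.pyGetD ((pvRmx (l.reverse.getD 0 0) l.reverse).reverse) (I : Int) 0
      = pvMaxOf (l.drop I) := by
  have hlen : (pvRmx (l.reverse.getD 0 0) l.reverse).length = l.length := by
    rw [pvRmx_length, List.length_reverse]
  rw [PySem.List.pyGetD_natCast, List.getD_eq_getElem?_getD,
    List.getElem?_reverse (by omega), hlen]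
  have hk : l.length - 1 - I < l.reverse.length := by simp; omega
  rw [pvRmx_get _ _ _ hk]
  have h1 : l.length - 1 - I + 1 = l.length - I := by omega
  rw [h1, List.take_reverse]
  have h2 : l.length - (l.length - I) = I := by omega
  rw [h2]
  have hc : (l.reverse).getD 0 0 = ((l.drop I).reverse).getD 0 0 := by
    rw [List.getD_eq_getElem?_getD, List.getD_eq_getElem?_getD,
      List.getElem?_reverse (by omega),
      List.getElem?_reverse (by rw [List.length_drop]; omega)]
    rw [List.getElem?_drop]
    simp only [List.length_drop]
    have hidx : I + (l.length - I - 1 - 0) = l.length - 1 - 0 := by omega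
    rw [hidx]
  rw [Option.getD_some, hc, pvMaxOf_foldl_self]
  apply pvMaxOf_reverse
  intro h
  have := congrArg List.length h
  simp at this
  omega

theorem pvWin_take (xs : List Int) (W I j : Nat) (h : j + W ≤ I) :
    pvWin (xs.take I) W j = pvWin xs W j := by
  unfold pvWin
  rw [List.drop_take, List.take_take]
  have hm : min W (I - j) = W := by omega
  rw [hm]

theorem pvWin_drop (xs : List Int) (W I j : Nat) :
    pvWin (xs.drop I) W j = pvWin xs W (I + j) := by
  unfold pvWin
  rw [List.drop_drop]

theorem pvWS_take (xs : List Int) (W I : Nat) (hWI : W ≤ I) (hI : I ≤ xs.length) :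
    pvWS (xs.take I) W = (pvWS xs W).take (I - W + 1) := by
  unfold pvWS
  apply List.ext_getElem
  · simp
    omega
  · intro k h1 h2
    simp only [List.getElem_take, List.getElem_map, List.getElem_range]
    simp only [List.length_take, List.length_map, List.length_range, lt_min_iff] at h2
    exact pvWin_take xs W I k (by omega)

theorem pvWS_drop (xs : List Int) (W I : Nat) (hI : I + W ≤ xs.length) :
    pvWS (xs.drop I) W = (pvWS xs W).drop I := by
  unfold pvWS
  apply List.ext_getElem
  · simp
    omega
  · intro k h1 h2
    simp only [List.getElem_drop, List.getElem_map, List.getElem_range]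
    exact pvWin_drop xs W I k

theorem pvWS_length (xs : List Int) (W : Nat) : (pvWS xs W).length = xs.length - W + 1 := by
  simp [pvWS]

theorem pvMain (xs : List Int) (w : Int) (hw : 0 ≤ w) :
    whackAMole2 xs w = whackAMole2_alt xs w := by
  obtain ⟨W, rfl⟩ : ∃ W : Nat, w = (W : Int) := ⟨w.toNat, (Int.toNat_of_nonneg hw).symm⟩
  simp only [whackAMole2, whackAMole2_alt]
  by_cases hbig : (xs.length : Int) < 2 * (W : Int)
  · rw [if_pos (Or.inr hbig)]
    rw [PySem.List.pyRange_one_eq_nil (by omega)]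
    simp
  · rw [if_neg (by omega)]
    apply PySem.List.foldl_congr_mem
    intro acc i hi
    rw [PySem.List.mem_pyRange_one] at hi
    obtain ⟨hi1, hi2⟩ := hi
    obtain ⟨I, rfl⟩ : ∃ I : Nat, i = (I : Int) :=
      ⟨i.toNat, (Int.toNat_of_nonneg (by omega)).symm⟩
    have hWI : W ≤ I := by omega
    have hIn : I + W ≤ xs.length := by omega
    congr 1
    rw [PySem.List.slice_to_natCast, PySem.List.slice_from_natCast]
    rw [pvWhackAMole_eq, pvWhackAMole_eq, pvWS_take xs W I hWI (by omega),
      pvWS_drop xs W I hIn]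
    rw [pvWindowSums_eq, pvRunningMax_eq, pvRunningMax_eq]
    have hc : ((I : Int) - (W : Int)) = ((I - W : Nat) : Int) := by omega
    rw [hc, pvPrefGet _ _ (by rw [pvWS_length]; omega),
      pvSuffGet _ _ (by rw [pvWS_length]; omega)]

-- ===== VERDICT (by name: the statement is the Claim_ definition above) =====
theorem whackAMole2_spec : Claim_equal_whackAMole2 := by
  intro moles mallet _ hpre
  unfold Spec_whackAMole2
  unfold Pre_whackAMole2 at hpre
  exact pvMain moles mallet hpre
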